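-- pv_equiv track=rewrite | github.com/Ranjith36963/AtoZ-Jobs-AI | pipeline/src/enrichment/companies_house.py | sic_to_section
-- ===== SOURCE A (Python) =====
-- _SIC_RANGES: list[tuple[int, int, str]] = [
--     (1, 3, "A"), (5, 9, "B"), (10, 33, "C"), (35, 35, "D"),
--     (36, 39, "E"), (41, 43, "F"), (45, 47, "G"), (49, 53, "H"),
--     (55, 56, "I"), (58, 63, "J"), (64, 66, "K"), (68, 68, "L"),
--     (69, 75, "M"), (77, 82, "N"), (84, 84, "O"), (85, 85, "P"),
--     (86, 88, "Q"), (90, 93, "R"), (94, 96, "S"), (97, 98, "T"),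
--     (99, 99, "U"),
-- ]
--
-- def sic_to_section(sic_code: str) -> str:
--     """Map 5-digit SIC code to section letter (A-U).
--
--     Args:
--         sic_code: 5-digit SIC code string (e.g., '62020').
--
--     Returns:
--         Section letter (e.g., 'J' for Information and Communication).
--     """
--     if not sic_code or len(sic_code) < 2:
--         return "S"  # default: Other Service Activities
--
--     try:
--         code = int(sic_code[:2])
--     except ValueError:
--         return "S"
--
--     for start, end, section in _SIC_RANGES:
--         if start <= code <= end:
--             return section
--     return "S"
-- ===== SOURCE B (Python) =====
-- _SIC_RANGES: list[tuple[int, int, str]] = [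
--     (1, 3, "A"), (5, 9, "B"), (10, 33, "C"), (35, 35, "D"),
--     (36, 39, "E"), (41, 43, "F"), (45, 47, "G"), (49, 53, "H"),
--     (55, 56, "I"), (58, 63, "J"), (64, 66, "K"), (68, 68, "L"),
--     (69, 75, "M"), (77, 82, "N"), (84, 84, "O"), (85, 85, "P"),
--     (86, 88, "Q"), (90, 93, "R"), (94, 96, "S"), (97, 98, "T"),
--     (99, 99, "U"),
-- ]
--
-- # Expanded prefix index built once at import time: section letter for every
-- # 2-digit prefix 0..99 ("S" in the gaps), so no per-call range scan is needed.
-- _SECTION_BY_PREFIX: list[str] = ["S"] * 100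
-- for _start, _end, _letter in _SIC_RANGES:
--     for _c in range(_start, _end + 1):
--         _SECTION_BY_PREFIX[_c] = _letter
--
--
-- def sic_to_section(sic_code: str) -> str:
--     """Map 5-digit SIC code to section letter (A-U)."""
--     if not sic_code or len(sic_code) < 2:
--         return "S"
--     try:
--         code = int(sic_code[:2])
--     except ValueError:
--         return "S"
--     if 0 <= code < 100:
--         return _SECTION_BY_PREFIX[code]
--     return "S"
-- ===== Notes on version B (the rewrite author's own statement) =====
-- stated objective: idiomatic
-- what changed: Replaces the per-call linear scan over the 21 SIC ranges by a 100-entry section-letter table expanded once at import time and indexed directly by the 2-digit prefix.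
import Mathlib
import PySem

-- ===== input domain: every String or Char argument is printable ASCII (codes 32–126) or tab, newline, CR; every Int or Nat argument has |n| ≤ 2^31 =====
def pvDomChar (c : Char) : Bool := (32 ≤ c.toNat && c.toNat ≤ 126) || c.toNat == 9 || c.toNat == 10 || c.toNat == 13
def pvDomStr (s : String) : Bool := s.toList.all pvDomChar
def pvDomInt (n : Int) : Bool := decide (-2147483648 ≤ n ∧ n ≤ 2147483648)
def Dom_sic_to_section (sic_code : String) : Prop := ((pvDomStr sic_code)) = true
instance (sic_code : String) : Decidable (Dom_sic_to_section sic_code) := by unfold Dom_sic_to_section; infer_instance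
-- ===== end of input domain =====

-- B replaces A's per-call scan over the 21 SIC ranges by a 100-entry prefix table built once; idiomatic lookup.

-- shared module-level data: _SIC_RANGES
def sicRanges : List (Int × Int × String) := [
  (1, 3, "A"), (5, 9, "B"), (10, 33, "C"), (35, 35, "D"),
  (36, 39, "E"), (41, 43, "F"), (45, 47, "G"), (49, 53, "H"),
  (55, 56, "I"), (58, 63, "J"), (64, 66, "K"), (68, 68, "L"),
  (69, 75, "M"), (77, 82, "N"), (84, 84, "O"), (85, 85, "P"),
  (86, 88, "Q"), (90, 93, "R"), (94, 96, "S"), (97, 98, "T"),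
  (99, 99, "U")]

-- ===== PORT A =====
-- the for-loop with early return over _SIC_RANGES
def scanRanges (code : Int) : List (Int × Int × String) → String
  | [] => "S"
  | (s, e, sec) :: rest => if s ≤ code ∧ code ≤ e then sec else scanRanges code rest

def sic_to_section (sic_code : String) : String :=
  if sic_code.toList.length < 2 then "S"   -- covers 'not sic_code' too
  else
    match PySem.Int.ofChars? (PySem.List.slice sic_code.toList none (some 2)) with
    | none => "S"                          -- except ValueError
    | some code => scanRanges code sicRanges

-- ===== PORT B =====
-- _SECTION_BY_PREFIX: ["S"]*100, then the double loop writing each prefix's letter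
def sectionByPrefix : List String :=
  sicRanges.foldl
    (fun t r => (PySem.List.pyRange r.1 (r.2.1 + 1) 1).foldl (fun t c => t.set c.toNat r.2.2) t)
    (List.replicate 100 "S")

def sic_to_section_alt (sic_code : String) : String :=
  if sic_code.toList.length < 2 then "S"
  else
    match PySem.Int.ofChars? (PySem.List.slice sic_code.toList none (some 2)) with
    | none => "S"
    | some code =>
      if 0 ≤ code ∧ code < 100 then PySem.List.pyGetD sectionByPrefix code "S" else "S"

-- ===== PRECONDITION & SPEC =====
def Spec_sic_to_section (sic_code : String) (out : String) : Prop := out = sic_to_section_alt sic_code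
instance (sic_code : String) (out : String) : Decidable (Spec_sic_to_section sic_code out) := by unfold Spec_sic_to_section; infer_instance

-- ===== CLAIM (what is proved, stated in full; the proofs are below) =====
def Claim_equal_sic_to_section : Prop := ∀ (sic_code : String), Dom_sic_to_section sic_code → Spec_sic_to_section sic_code (sic_to_section sic_code)

-- ===== LEMMAS AND PROOFS =====

-- a scan over ranges none of which contains the code falls through to "S"
theorem scan_miss (code : Int) (l : List (Int × Int × String))
    (h : ∀ x ∈ l, ¬(x.1 ≤ code ∧ code ≤ x.2.1)) : scanRanges code l = "S" := by
  induction l with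
  | nil => rfl
  | cons x rest ih =>
    obtain ⟨a, b, sec⟩ := x
    simpa [scanRanges, h _ (List.mem_cons_self ..)] using ih fun y hy => h y (List.mem_cons_of_mem _ hy)

-- the scan and the table lookup agree on every in-range prefix (checked by the kernel)
set_option maxRecDepth 4000 in
theorem table_key : ∀ n ∈ List.range 100,
    scanRanges (n : Int) sicRanges = PySem.List.pyGetD sectionByPrefix (n : Int) "S" := by decide

-- the scan and the table lookup agree on every parsed code
theorem scan_eq_table (code : Int) :
    scanRanges code sicRanges =
      (if 0 ≤ code ∧ code < 100 then PySem.List.pyGetD sectionByPrefix code "S" else "S") := by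
  by_cases h : 0 ≤ code ∧ code < 100
  · obtain ⟨h0, h1⟩ := h
    obtain ⟨n, rfl⟩ := Int.eq_ofNat_of_zero_le h0
    rw [if_pos ⟨h0, h1⟩]
    exact table_key n (List.mem_range.mpr (by exact_mod_cast h1))
  · rw [if_neg h]
    exact scan_miss code sicRanges (fun x hx => by fin_cases hx <;> dsimp <;> omega)

-- ===== VERDICT (by name: the statement is the Claim_ definition above) =====
theorem sic_to_section_spec : Claim_equal_sic_to_section := by
  intro s _
  unfold Spec_sic_to_section sic_to_section sic_to_section_alt
  rcases Nat.lt_or_ge s.toList.length 2 with h | h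
  · rw [if_pos h, if_pos h]
  · rw [if_neg (by omega), if_neg (by omega)]
    cases PySem.Int.ofChars? (PySem.List.slice s.toList none (some 2)) with
    | none => rfl
    | some code => exact scan_eq_table code
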